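-- pv_equiv track=rewrite | github.com/yushyn-andriy/algo | competitions/onlinejudge/intro/272/p272.py | tex_quotes
-- ===== SOURCE A (Python) =====
-- def tex_quotes(s):
--     result = ''
--     first = True
--     for i, ch in enumerate(s):
--         if ch != '"':
--             result += ch
--             continue
--
--         if ch == '"' and first:
--             result += '``'
--             first = False
--         elif ch == '"' and not first:
--             result += '\'\''
--             first = True
--     return result
-- ===== SOURCE B (Python) =====
-- def tex_quotes(s):
--     parts = s.split('"')
--     out = [parts[0]]
--     for k, part in enumerate(parts[1:]):
--         out.append('``' if k % 2 == 0 else "''")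
--         out.append(part)
--     return ''.join(out)
-- ===== Notes on version B (the rewrite author's own statement) =====
-- stated objective: idiomatic
-- what changed: Replaces the char-by-char flag-toggling loop with repeated string concatenation by splitting on the quote character and joining segments once, choosing open/close quotes by delimiter-index parity.
import Mathlib
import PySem

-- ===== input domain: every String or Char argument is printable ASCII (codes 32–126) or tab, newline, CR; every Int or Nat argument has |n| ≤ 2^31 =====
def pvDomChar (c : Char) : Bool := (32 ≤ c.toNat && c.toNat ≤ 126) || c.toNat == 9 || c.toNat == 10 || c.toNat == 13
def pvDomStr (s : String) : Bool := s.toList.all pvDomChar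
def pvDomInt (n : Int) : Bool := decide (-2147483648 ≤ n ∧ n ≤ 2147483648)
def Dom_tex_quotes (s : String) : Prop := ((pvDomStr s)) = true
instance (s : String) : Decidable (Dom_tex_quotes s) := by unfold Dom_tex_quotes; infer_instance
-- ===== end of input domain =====

-- B replaces A's char-by-char flag-toggling loop by split('"') + join with quotes chosen by delimiter-index parity (idiomatic decomposition).


-- ===== PORT A =====
-- A's loop: result accumulator and the 'first' flag, character by character.
def texQuotesGo : List Char → List Char → Bool → List Char
  | [], res, _ => res
  | c :: rest, res, first =>
    if c ≠ '"' then texQuotesGo rest (res ++ [c]) first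
    else if first then texQuotesGo rest (res ++ ['`', '`']) false
    else texQuotesGo rest (res ++ ['\'', '\'']) true

def tex_quotes (s : String) : String := String.ofList (texQuotesGo s.toList [] true)

-- ===== PORT B =====
def tex_quotes_alt (s : String) : String :=
  match PySem.Str.split? s "\"" with
  | none => ""  -- unreachable: the separator "\"" is nonempty
  | some parts =>
    match parts with
    | [] => ""  -- unreachable: split never returns an empty list
    | p0 :: rest =>
      let out := (PySem.List.enumerate rest).foldl
        (fun acc kp => acc ++ [(if kp.1 % 2 == 0 then "``" else "''"), kp.2]) [p0]
      PySem.Str.join "" out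

-- ===== PRECONDITION & SPEC =====
def Spec_tex_quotes (s : String) (out : String) : Prop := out = tex_quotes_alt s
instance (s : String) (out : String) : Decidable (Spec_tex_quotes s out) := by unfold Spec_tex_quotes; infer_instance

-- ===== CLAIM (what is proved, stated in full; the proofs are below) =====
def Claim_equal_tex_quotes : Prop := ∀ (s : String), Dom_tex_quotes s → Spec_tex_quotes s (tex_quotes s)

-- ===== LEMMAS AND PROOFS =====

-- a simple structural split on '"'
def split1 : List Char → List (List Char)
  | [] => [[]]
  | c :: rest =>
    if c = '"' then [] :: split1 rest
    else
      match split1 rest with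
      | [] => [[c]]
      | p :: ps => (c :: p) :: ps

lemma split1_ne_nil (cs : List Char) : split1 cs ≠ [] := by
  cases cs with
  | nil => simp [split1]
  | cons c rest =>
    simp only [split1]
    split
    · simp
    · split <;> simp

def quoteOf (first : Bool) : List Char := if first then ['`', '`'] else ['\'', '\'']

def glueRest : Bool → List (List Char) → List Char
  | _, [] => []
  | first, q :: qs => quoteOf first ++ q ++ glueRest (!first) qs

def glue (first : Bool) : List (List Char) → List Char
  | [] => []
  | p :: ps => p ++ glueRest first ps

lemma splitOn_go_eq (cs : List Char) : ∀ (fuel : Nat), cs.length < fuel →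
    ∀ (cur : List Char) (acc : List (List Char)),
    PySem.Chars.splitOn.go ['"'] fuel cs cur acc
      = acc.reverse ++ (split1 cs).modifyHead (cur.reverse ++ ·) := by
  induction cs with
  | nil =>
    intro fuel hf cur acc
    match fuel, hf with
    | fuel + 1, _ => simp [PySem.Chars.splitOn.go, split1]
  | cons c rest ih =>
    intro fuel hf cur acc
    match fuel, hf with
    | fuel + 1, hf =>
      by_cases hc : c = '"'
      · subst hc
        rw [show PySem.Chars.splitOn.go ['"'] (fuel + 1) ('"' :: rest) cur acc
            = PySem.Chars.splitOn.go ['"'] fuel rest [] (cur.reverse :: acc) by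
          simp [PySem.Chars.splitOn.go, List.isPrefixOf]]
        rw [ih fuel (by simpa using hf) [] (cur.reverse :: acc)]
        obtain ⟨p, ps, hps⟩ := List.exists_cons_of_ne_nil (split1_ne_nil rest)
        simp [split1, hps]
      · rw [show PySem.Chars.splitOn.go ['"'] (fuel + 1) (c :: rest) cur acc
            = PySem.Chars.splitOn.go ['"'] fuel rest (c :: cur) acc by
          conv_lhs => rw [PySem.Chars.splitOn.go.eq_3]
          rw [show (['"'].isPrefixOf (c :: rest)) = false by
            simp [List.isPrefixOf, Ne.symm hc]]
          simp]
        rw [ih fuel (by simpa using hf) (c :: cur) acc]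
        obtain ⟨p, ps, hps⟩ := List.exists_cons_of_ne_nil (split1_ne_nil rest)
        simp [split1, hps, hc]

lemma splitOn_eq_split1 (cs : List Char) : PySem.Chars.splitOn cs ['"'] = split1 cs := by
  rw [PySem.Chars.splitOn, splitOn_go_eq cs (cs.length + 1) (by omega) [] []]
  obtain ⟨p, ps, hps⟩ := List.exists_cons_of_ne_nil (split1_ne_nil cs)
  simp [hps]

lemma texQuotesGo_eq (cs : List Char) : ∀ (res : List Char) (first : Bool),
    texQuotesGo cs res first = res ++ glue first (split1 cs) := by
  induction cs with
  | nil => intro res first; simp [texQuotesGo, split1, glue, glueRest]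
  | cons c rest ih =>
    intro res first
    by_cases hc : c = '"'
    · subst hc
      obtain ⟨p, ps, hps⟩ := List.exists_cons_of_ne_nil (split1_ne_nil rest)
      cases first <;>
        simp [texQuotesGo, ih, split1, hps, glue, glueRest, quoteOf]
    · obtain ⟨p, ps, hps⟩ := List.exists_cons_of_ne_nil (split1_ne_nil rest)
      simp [texQuotesGo, hc, ih, split1, hps, glue]

lemma join_nil_eq_flatten (l : List (List Char)) : PySem.Chars.join [] l = l.flatten := by
  induction l with
  | nil => simp [PySem.Chars.join, List.intercalate]
  | cons p ps ih =>
    cases ps with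
    | nil => simp [PySem.Chars.join, List.intercalate]
    | cons q qs => rw [PySem.Chars.join_cons_cons]; simp at ih ⊢; simpa using ih

lemma loop_flatten (rest : List String) : ∀ (k : Nat) (acc : List String),
    (((PySem.List.enumerate rest (k : Int)).foldl
        (fun acc kp => acc ++ [(if kp.1 % 2 == 0 then "``" else "''"), kp.2]) acc).map
      String.toList).flatten
    = (acc.map String.toList).flatten ++ glueRest (k % 2 == 0) (rest.map String.toList) := by
  induction rest with
  | nil => intro k acc; simp [PySem.List.enumerate_nil, glueRest]
  | cons x xs ih =>
    intro k acc
    rw [PySem.List.enumerate_cons, List.foldl_cons,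
      show ((k : Int) + 1) = ((k + 1 : Nat) : Int) by push_cast; ring, ih]
    have hcast : ((k : Int) % 2) = ((k % 2 : Nat) : Int) := by push_cast; ring
    have hpar : ((k : Int) % 2 == 0) = (k % 2 == 0) := by
      rw [hcast]; rcases Nat.mod_two_eq_zero_or_one k with h | h <;> simp [h]
    have hpar2 : ((k + 1) % 2 == 0) = !(k % 2 == 0) := by
      rcases Nat.mod_two_eq_zero_or_one k with h | h <;> simp [Nat.add_mod, h]
    rw [hpar, hpar2]
    cases hb : (k % 2 == 0) <;> simp [glueRest, quoteOf]

-- ===== VERDICT (by name: the statement is the Claim_ definition above) =====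
theorem tex_quotes_spec : Claim_equal_tex_quotes := by
  intro s _
  unfold Spec_tex_quotes tex_quotes tex_quotes_alt
  have hsplit : Option.map (List.map String.toList) (PySem.Str.split? s "\"")
      = some (split1 s.toList) := by
    rw [PySem.Str.split?_map]
    have : ("\"").toList = ['"'] := by decide
    rw [this, PySem.Chars.split?]
    simp [splitOn_eq_split1]
  cases hsp : PySem.Str.split? s "\"" with
  | none => rw [hsp] at hsplit; simp at hsplit
  | some parts =>
    rw [hsp] at hsplit
    simp only [Option.map_some, Option.some.injEq] at hsplit
    cases parts with
    | nil => exfalso; exact split1_ne_nil _ (by simpa using hsplit.symm)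
    | cons p0 rest =>
      simp only
      rw [PySem.Str.join, texQuotesGo_eq]
      congr 1
      rw [show ("" : String).toList = [] by decide, join_nil_eq_flatten]
      have h := loop_flatten rest 0 [p0]
      rw [show ((0 : Nat) : Int) = 0 by simp] at h
      rw [h]
      rw [← hsplit]
      simp [glue]
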